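-- pv_equiv track=rewrite | github.com/westerndigitalcorporation/desmod | desmod/config.py | get_short_special
-- ===== SOURCE A (Python) =====
-- def get_short_special(special):
--     short_special = []
--     for key, value in special:
--         key_parts = key.split('.')
--         for i in reversed(range(len(key_parts))):
--             short_key = '.'.join(key_parts[i:])
--             if all(k == key or not k.endswith(short_key) for k, _ in special):
--                 short_special.append((short_key, value))
--                 break
--     return short_special
-- ===== SOURCE B (Python) =====
-- def get_short_special(special):
--     # One pass builds a counter of every character-suffix of every key plus a
--     # counter of full keys; each key's shortest unique dot-suffix is then found
--     # by growing a candidate string outward (prepending parts) and comparing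
--     # two dict lookups, instead of A's endswith scan over all keys.
--     suffix_count = {}
--     key_count = {}
--     for k, _ in special:
--         key_count[k] = key_count.get(k, 0) + 1
--         for i in range(len(k) + 1):
--             s = k[i:]
--             suffix_count[s] = suffix_count.get(s, 0) + 1
--
--     def shortest(key):
--         n = key_count[key]
--         cand = None
--         for part in reversed(key.split('.')):
--             cand = part if cand is None else part + '.' + cand
--             if suffix_count[cand] == n:
--                 return cand
--         return None
--
--     return [(s, v) for s, v in ((shortest(k), v) for k, v in special) if s is not None]
-- ===== Notes on version B (the rewrite author's own statement) =====
-- stated objective: alternative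
-- what changed: B precomputes in one pass a dict counting every character-suffix of every key plus a dict of full-key multiplicities, then finds each key's shortest unique suffix by growing a candidate string outward from the last part and deciding each candidate with two dict lookups, instead of A's join-of-slice candidates each tested by an endswith scan over the whole list.
import Mathlib
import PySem

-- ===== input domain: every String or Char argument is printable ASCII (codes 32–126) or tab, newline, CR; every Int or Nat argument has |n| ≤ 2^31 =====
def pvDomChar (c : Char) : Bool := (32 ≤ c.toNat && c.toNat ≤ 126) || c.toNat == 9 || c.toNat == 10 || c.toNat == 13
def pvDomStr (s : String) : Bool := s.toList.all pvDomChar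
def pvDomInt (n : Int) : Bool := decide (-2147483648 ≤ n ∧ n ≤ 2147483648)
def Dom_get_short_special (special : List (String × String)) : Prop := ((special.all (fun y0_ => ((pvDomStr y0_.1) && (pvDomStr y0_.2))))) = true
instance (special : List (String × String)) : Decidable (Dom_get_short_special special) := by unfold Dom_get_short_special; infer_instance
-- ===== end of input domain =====

-- B builds, in one pass, a dict counting every character-suffix of every key and a dict of
-- full-key multiplicities, then finds each key's shortest unique suffix by growing a candidate
-- string outward from the last dot-part, deciding each candidate by two dict lookups instead of
-- A's endswith scan over the whole list.

-- ===== PORT A =====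
-- key.split('.') — the separator "." is nonempty, so Python's split never raises; split? is always some here
def pvSplitDot (s : String) : List String := (PySem.Str.split? s ".").getD []

-- all(k == key or not k.endswith(short_key) for k, _ in special)
def aCond (special : List (String × String)) (key short_key : String) : Bool :=
  special.all (fun kv => kv.1 == key || !(PySem.Str.endswith kv.1 short_key))

-- the inner 'for i in reversed(range(len(key_parts)))' loop with its break, as an Option
def aScan (special : List (String × String)) (key : String) (key_parts : List String) :
    List Int → Option String
  | [] => none
  | i :: rest =>
    let short_key := PySem.Str.join "." (PySem.List.slice key_parts (some i) none)
    if aCond special key short_key then some short_key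
    else aScan special key key_parts rest

def get_short_special (special : List (String × String)) : List (String × String) :=
  special.foldl (fun acc kv =>
    let key_parts := pvSplitDot kv.1
    match aScan special kv.1 key_parts ((PySem.List.pyRange 0 key_parts.length 1).reverse) with
    | some s => acc ++ [(s, kv.2)]
    | none => acc) []

-- ===== PORT B =====
-- Source B's first loop: suffix_count and key_count built in one pass over special
def bCounts (special : List (String × String)) :
    PySem.Dict String Int × PySem.Dict String Int :=
  special.foldl (fun st kv =>
    let kc := st.2.modify kv.1 0 (· + 1)
    let sc := (PySem.List.pyRange 0 (PySem.Str.len kv.1 + 1) 1).foldl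
      (fun d i => d.modify (PySem.Str.slice kv.1 (some i) none) 0 (· + 1)) st.1
    (sc, kc)) (PySem.Dict.empty, PySem.Dict.empty)

-- Python string concatenation '+', exact: the characters of the result are the two char lists appended
def strCat (s t : String) : String := String.ofList (s.toList ++ t.toList)

-- Source B's 'shortest' loop over reversed(key.split('.')) with the growing candidate 'cand'.
-- suffix_count[cand] is ported as getD 0: cand is always a character-suffix of key, which
-- itself contributed to suffix_count, so the key is always present and the lookup never raises.
def bGo (sc : PySem.Dict String Int) (n : Int) : Option String → List String → Option String
  | _, [] => none
  | cand, part :: rest =>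
    let cand' := match cand with
      | none => part
      | some c => strCat part (strCat "." c)
    if sc.getD cand' 0 == n then some cand' else bGo sc n (some cand') rest

-- the final comprehension over the generator: map then filterMap
def get_short_special_alt (special : List (String × String)) : List (String × String) :=
  let c := bCounts special
  (special.map (fun kv =>
      (bGo c.1 (c.2.getD kv.1 0) none ((PySem.Str.split? kv.1 ".").getD []).reverse, kv.2))).filterMap
    (fun p => p.1.map (fun s => (s, p.2)))

-- ===== PRECONDITION & SPEC =====
def Spec_get_short_special (special : List (String × String)) (out : List (String × String)) : Prop := out = get_short_special_alt special
instance (special : List (String × String)) (out : List (String × String)) : Decidable (Spec_get_short_special special out) := by unfold Spec_get_short_special; infer_instance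

-- ===== CLAIM (what is proved, stated in full; the proofs are below) =====
def Claim_equal_get_short_special : Prop := ∀ (special : List (String × String)), Dom_get_short_special special → Spec_get_short_special special (get_short_special special)

-- ===== LEMMAS AND PROOFS =====

theorem pvSplitDot_toList (key : String) :
    (pvSplitDot key).map String.toList = PySem.Chars.splitOn key.toList ['.'] := by
  simp only [pvSplitDot]
  have h := PySem.Str.split?_map key "."
  have hsep : (".".toList : List Char) = ['.'] := by decide
  rw [hsep] at h
  have h2 : PySem.Chars.split? key.toList ['.'] = some (PySem.Chars.splitOn key.toList ['.']) := by
    simp [PySem.Chars.split?]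
  rw [h2] at h
  cases hs : PySem.Str.split? key "." with
  | none => rw [hs] at h; simp at h
  | some parts => rw [hs] at h; simpa using h

theorem ic_cons_cons (sep a b : List Char) (rest : List (List Char)) :
    List.intercalate sep (a :: b :: rest) = a ++ sep ++ List.intercalate sep (b :: rest) := by
  simp [List.intercalate, List.intersperse]

theorem ic_append_singleton (sep y : List Char) (xs : List (List Char)) (h : xs ≠ []) :
    List.intercalate sep (xs ++ [y]) = List.intercalate sep xs ++ sep ++ y := by
  induction xs with
  | nil => simp at h
  | cons x xs ih =>
    cases xs with
    | nil => simp [List.intercalate]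
    | cons b rest =>
      have : x :: b :: rest ++ [y] = x :: (b :: (rest ++ [y])) := by simp
      rw [this, ic_cons_cons, show b :: (rest ++ [y]) = (b :: rest) ++ [y] by simp,
        ih (by simp), ic_cons_cons]
      simp [List.append_assoc]

theorem ic_last_append (sep : List Char) (xs : List (List Char)) (y z : List Char) :
    List.intercalate sep (xs ++ [y ++ z]) = List.intercalate sep (xs ++ [y]) ++ z := by
  cases xs with
  | nil => simp [List.intercalate]
  | cons x xs =>
    rw [ic_append_singleton sep (y ++ z) _ (by simp), ic_append_singleton sep y _ (by simp)]
    simp [List.append_assoc]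

theorem go_intercalate (sep : List Char) (hsep : sep ≠ []) :
    ∀ (fuel : Nat) (l cur : List Char) (acc : List (List Char)), l.length < fuel →
    List.intercalate sep (PySem.Chars.splitOn.go sep fuel l cur acc) =
      List.intercalate sep ((cur.reverse :: acc).reverse) ++ l := by
  intro fuel
  induction fuel with
  | zero => intro l cur acc h; omega
  | succ fuel ih =>
    intro l cur acc h
    cases l with
    | nil =>
      rw [PySem.Chars.splitOn.go]
      · simp
      · omega
    | cons c rest =>
      simp only [List.length_cons] at h
      rw [PySem.Chars.splitOn.go]
      by_cases hp : sep.isPrefixOf (c :: rest)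
      · simp only [hp, if_true]
        have hlen : 1 ≤ sep.length := by
          cases sep with | nil => simp at hsep | cons _ _ => simp
        have hd : (List.drop sep.length (c :: rest)).length < fuel := by
          simp [List.length_drop]; omega
        rw [ih _ _ _ hd]
        have hsplit : sep ++ List.drop sep.length (c :: rest) = c :: rest := by
          have := List.isPrefixOf_iff_prefix.mp hp
          exact List.prefix_iff_eq_append.mp this
        calc List.intercalate sep (([].reverse :: cur.reverse :: acc).reverse)
              ++ List.drop sep.length (c :: rest)
            = List.intercalate sep ((cur.reverse :: acc).reverse ++ [[]])
              ++ List.drop sep.length (c :: rest) := by simp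
          _ = List.intercalate sep ((cur.reverse :: acc).reverse) ++ sep ++ []
              ++ List.drop sep.length (c :: rest) := by
                rw [ic_append_singleton sep [] _ (by simp)]
          _ = List.intercalate sep ((cur.reverse :: acc).reverse) ++ (c :: rest) := by
                rw [List.append_nil, List.append_assoc, hsplit]
      · simp only [hp, Bool.false_eq_true, if_false]
        have hd : rest.length < fuel := by omega
        rw [ih _ _ _ hd]
        calc List.intercalate sep (((c :: cur).reverse :: acc).reverse) ++ rest
            = List.intercalate sep (acc.reverse ++ [cur.reverse ++ [c]]) ++ rest := by simp
          _ = List.intercalate sep (acc.reverse ++ [cur.reverse]) ++ [c] ++ rest := by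
                rw [ic_last_append]
          _ = List.intercalate sep ((cur.reverse :: acc).reverse) ++ (c :: rest) := by simp

theorem join_splitOn (sep cs : List Char) (hsep : sep ≠ []) :
    PySem.Chars.join sep (PySem.Chars.splitOn cs sep) = cs := by
  show List.intercalate sep _ = cs
  rw [PySem.Chars.splitOn, go_intercalate sep hsep (cs.length + 1) cs [] [] (by omega)]
  simp [List.intercalate]

theorem ic_drop_suffix (sep : List Char) (ps : List (List Char)) (j : Nat) :
    List.intercalate sep (ps.drop j) <:+ List.intercalate sep ps := by
  induction ps generalizing j with
  | nil => simp
  | cons p rest ih =>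
    cases j with
    | zero => simp
    | succ j =>
      rw [List.drop_succ_cons]
      refine (ih j).trans ?_
      cases rest with
      | nil => simp [List.intercalate]
      | cons b rs =>
        rw [ic_cons_cons]
        exact (List.suffix_append _ _)

theorem join_drop_suffix (key : String) (j : Nat) :
    (PySem.Str.join "." ((pvSplitDot key).drop j)).toList <:+ key.toList := by
  rw [PySem.Str.toList_join]
  have hsep : (".".toList : List Char) = ['.'] := by decide
  rw [hsep, List.map_drop, show PySem.Chars.join ['.'] = List.intercalate ['.'] from rfl]
  calc List.intercalate ['.'] (((pvSplitDot key).map String.toList).drop j)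
      <:+ List.intercalate ['.'] ((pvSplitDot key).map String.toList) :=
        ic_drop_suffix _ _ _
    _ = key.toList := by
        rw [pvSplitDot_toList]
        exact join_splitOn ['.'] key.toList (by simp)

theorem count_suffixes (key s : String) :
    (((PySem.List.pyRange 0 (PySem.Str.len key + 1) 1).map
        (fun i => PySem.Str.slice key (some i) none)).count s)
      = if PySem.Str.endswith key s then 1 else 0 := by
  have hL : PySem.Str.len key + 1 = ((key.toList.length + 1 : Nat) : Int) := by
    rw [PySem.Str.len_eq]; push_cast; ring
  rw [hL, PySem.List.pyRange_zero_natCast, List.map_map]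
  set L := key.toList.length with hLdef
  set h : Nat → String := (fun i => PySem.Str.slice key (some i) none) ∘ (fun k : Nat => (k : Int)) with hh
  have htl : ∀ i : Nat, (h i).toList = key.toList.drop i := by
    intro i
    simp only [hh, Function.comp_apply]
    rw [PySem.Str.toList_slice, PySem.Chars.slice_eq_listSlice,
      PySem.List.slice_from _ (by positivity : (0:Int) ≤ (i:Int))]
    simp
  have hmem : ∀ x : String, x ∈ (List.range (L+1)).map h ↔ x.toList <:+ key.toList := by
    intro x
    constructor
    · rintro hx
      rcases List.mem_map.mp hx with ⟨i, hi, rfl⟩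
      rw [htl]
      exact List.drop_suffix _ _
    · intro hx
      have := List.suffix_iff_eq_drop.mp hx
      have hxle : x.toList.length ≤ L := List.IsSuffix.length_le hx
      refine List.mem_map.mpr ⟨L - x.toList.length, List.mem_range.mpr (by omega), ?_⟩
      rw [← String.toList_inj, htl, ← this]
  have hnd : ((List.range (L+1)).map h).Nodup := by
    refine List.Nodup.map_on ?_ List.nodup_range
    intro i hi j hj hij
    have : (h i).toList = (h j).toList := by rw [hij]
    rw [htl, htl] at this
    have := congrArg List.length this
    simp only [List.length_drop] at this
    rw [List.mem_range] at hi hj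
    omega
  have hend : PySem.Str.endswith key s = true ↔ s.toList <:+ key.toList := by
    rw [PySem.Str.endswith_eq, PySem.Chars.endswith_iff]
  by_cases he : PySem.Str.endswith key s
  · rw [if_pos he]
    have hm : s ∈ (List.range (L+1)).map h := (hmem s).mpr (hend.mp he)
    have h1 := List.count_pos_iff.mpr hm
    have h2 := List.nodup_iff_count_le_one.mp hnd s
    omega
  · rw [if_neg he]
    refine List.count_eq_zero.mpr ?_
    intro hm
    exact he (hend.mpr ((hmem s).mp hm))

theorem inner_fold_getD (key : String) (d : PySem.Dict String Int) (s : String) :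
    ((PySem.List.pyRange 0 (PySem.Str.len key + 1) 1).foldl
        (fun d i => d.modify (PySem.Str.slice key (some i) none) 0 (· + 1)) d).getD s 0
      = d.getD s 0 + (if PySem.Str.endswith key s then 1 else 0) := by
  rw [← List.foldl_map (f := fun i => PySem.Str.slice key (some i) none)
        (g := fun (d : PySem.Dict String Int) x => d.modify x 0 (· + 1)),
    PySem.Dict.getD_foldl_modify_add_one, count_suffixes]
  split_ifs <;> simp

theorem counts_fold (special : List (String × String)) (d1 d2 : PySem.Dict String Int)
    (s k : String) :
    ((special.foldl (fun st kv =>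
        let kc := st.2.modify kv.1 0 (· + 1)
        let sc := (PySem.List.pyRange 0 (PySem.Str.len kv.1 + 1) 1).foldl
          (fun d i => d.modify (PySem.Str.slice kv.1 (some i) none) 0 (· + 1)) st.1
        (sc, kc)) (d1, d2)).1.getD s 0
       = d1.getD s 0 + (special.countP (fun kv => PySem.Str.endswith kv.1 s) : Int))
    ∧ ((special.foldl (fun st kv =>
        let kc := st.2.modify kv.1 0 (· + 1)
        let sc := (PySem.List.pyRange 0 (PySem.Str.len kv.1 + 1) 1).foldl
          (fun d i => d.modify (PySem.Str.slice kv.1 (some i) none) 0 (· + 1)) st.1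
        (sc, kc)) (d1, d2)).2.getD k 0
       = d2.getD k 0 + (special.countP (fun kv => kv.1 == k) : Int)) := by
  induction special generalizing d1 d2 with
  | nil => simp
  | cons kv rest ih =>
    simp only [List.foldl_cons, List.countP_cons]
    rcases ih ((PySem.List.pyRange 0 (PySem.Str.len kv.1 + 1) 1).foldl
          (fun d i => d.modify (PySem.Str.slice kv.1 (some i) none) 0 (· + 1)) d1)
        (d2.modify kv.1 0 (· + 1)) with ⟨ih1, ih2⟩
    constructor
    · rw [ih1, inner_fold_getD]
      push_cast
      split_ifs <;> ring
    · rw [ih2, PySem.Dict.getD_modify]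
      push_cast
      by_cases hk : k = kv.1
      · subst hk
        rw [if_pos rfl, if_pos (by simp)]
        ring
      · rw [if_neg hk, if_neg (fun h => hk ((beq_iff_eq.mp h).symm))]
        ring

theorem countP_mono_QP (l : List (String × String)) (key s : String)
    (hks : PySem.Str.endswith key s = true) :
    l.countP (fun kv => kv.1 == key) ≤ l.countP (fun kv => PySem.Str.endswith kv.1 s) := by
  refine List.countP_mono_left ?_
  intro kv _ hq
  rw [beq_iff_eq] at hq
  rw [hq]
  exact hks

theorem count_iff_all (l : List (String × String)) (key s : String)
    (hks : PySem.Str.endswith key s = true) :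
    l.countP (fun kv => PySem.Str.endswith kv.1 s) = l.countP (fun kv => kv.1 == key)
      ↔ ∀ kv ∈ l, kv.1 = key ∨ PySem.Str.endswith kv.1 s = false := by
  induction l with
  | nil => simp
  | cons kv rest ih =>
    by_cases hq : kv.1 = key
    · rw [List.countP_cons_of_pos (l := rest) (show PySem.Str.endswith kv.1 s = true by
          rw [hq]; exact hks),
        List.countP_cons_of_pos (l := rest) (show (kv.1 == key) = true from beq_iff_eq.mpr hq)]
      simp only [List.mem_cons]
      constructor
      · intro h x hx
        rcases hx with rfl | hx
        · exact Or.inl hq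
        · exact (ih.mp (by omega)) x hx
      · intro h
        have := ih.mpr (fun x hx => h x (Or.inr hx))
        omega
    · by_cases hp : PySem.Str.endswith kv.1 s
      · rw [List.countP_cons_of_pos (l := rest) hp,
          List.countP_cons_of_neg (l := rest) (show ¬((kv.1 == key) = true) by
            rw [beq_iff_eq]; exact hq)]
        have hmono := countP_mono_QP rest key s hks
        constructor
        · intro h; omega
        · intro h
          rcases h kv (by simp) with h' | h'
          · exact absurd h' hq
          · rw [hp] at h'; cases h'
      · rw [List.countP_cons_of_neg (l := rest) hp,
          List.countP_cons_of_neg (l := rest) (show ¬((kv.1 == key) = true) by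
            rw [beq_iff_eq]; exact hq)]
        simp only [List.mem_cons]
        constructor
        · intro h x hx
          rcases hx with rfl | hx
          · exact Or.inr (by cases hb : PySem.Str.endswith x.1 s with | false => rfl | true => exact absurd hb hp)
          · exact (ih.mp h) x hx
        · intro h
          exact ih.mpr (fun x hx => h x (Or.inr hx))

theorem cond_iff (special : List (String × String)) (key s : String)
    (hks : PySem.Str.endswith key s = true) :
    aCond special key s
      = (((special.countP (fun kv => PySem.Str.endswith kv.1 s) : Nat) : Int)
          == ((special.countP (fun kv => kv.1 == key) : Nat) : Int)) := by
  rw [Bool.eq_iff_iff]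
  rw [show ((((special.countP (fun kv => PySem.Str.endswith kv.1 s) : Nat) : Int)
          == ((special.countP (fun kv => kv.1 == key) : Nat) : Int)) = true)
      ↔ (special.countP (fun kv => PySem.Str.endswith kv.1 s)
          = special.countP (fun kv => kv.1 == key)) by
    rw [beq_iff_eq, Int.natCast_inj]]
  rw [count_iff_all special key s hks]
  unfold aCond
  rw [List.all_eq_true]
  constructor
  · intro h kv hkv
    rcases Bool.or_eq_true_iff.mp (h kv hkv) with h' | h'
    · exact Or.inl (beq_iff_eq.mp h')
    · exact Or.inr ((by cases hb : PySem.Str.endswith kv.1 s with | false => rfl | true => (rw [hb] at h'; cases h')))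
  · intro h kv hkv
    rcases h kv hkv with h' | h'
    · exact Bool.or_eq_true_iff.mpr (Or.inl (beq_iff_eq.mpr h'))
    · exact Bool.or_eq_true_iff.mpr (Or.inr ((by rw [h']; rfl)))

theorem bCounts_fst (special : List (String × String)) (s : String) :
    (bCounts special).1.getD s 0
      = ((special.countP (fun kv => PySem.Str.endswith kv.1 s) : Nat) : Int) := by
  unfold bCounts
  rw [(counts_fold special PySem.Dict.empty PySem.Dict.empty s s).1, PySem.Dict.getD_empty]
  ring

theorem bCounts_snd (special : List (String × String)) (k : String) :
    (bCounts special).2.getD k 0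
      = ((special.countP (fun kv => kv.1 == k) : Nat) : Int) := by
  unfold bCounts
  rw [(counts_fold special PySem.Dict.empty PySem.Dict.empty k k).2, PySem.Dict.getD_empty]
  ring

-- the growing candidate: prepending one part to the join of the later parts gives the join one part earlier
theorem join_drop_step (parts : List String) (m : Nat) (h : m < parts.length) :
    PySem.Str.join "." (parts.drop m)
      = if m + 1 = parts.length then parts[m]
        else strCat parts[m] (strCat "." (PySem.Str.join "." (parts.drop (m+1)))) := by
  rw [← String.toList_inj]
  have hdrop : parts.drop m = parts[m] :: parts.drop (m+1) := List.drop_eq_getElem_cons h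
  by_cases he : m + 1 = parts.length
  · have hnil : parts.drop (m+1) = [] := by
      apply List.drop_eq_nil_of_le; omega
    rw [if_pos he, hdrop, hnil, PySem.Str.toList_join]
    simp [PySem.Chars.join, List.intercalate]
  · have hne : parts.drop (m+1) ≠ [] := by
      intro hc
      have := List.drop_eq_nil_iff.mp hc
      omega
    rw [if_neg he, hdrop]
    obtain ⟨b, rs, hbr⟩ := List.exists_cons_of_ne_nil hne
    rw [hbr, PySem.Str.toList_join]
    simp only [strCat, String.toList_ofList, PySem.Str.toList_join, List.map_cons]
    rw [show PySem.Chars.join = List.intercalate from rfl, ic_cons_cons]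
    simp [List.append_assoc]

-- the two inner loops agree: B's outward-growing scan over the reversed first m parts
-- equals A's scan over the reversed indices 0..m-1
theorem scan_eq (special : List (String × String)) (key : String) :
    ∀ (m : Nat), m ≤ (pvSplitDot key).length →
    bGo (bCounts special).1 ((bCounts special).2.getD key 0)
        (if m = (pvSplitDot key).length then none
         else some (PySem.Str.join "." ((pvSplitDot key).drop m)))
        (((pvSplitDot key).take m).reverse)
      = aScan special key (pvSplitDot key)
          (((List.range m).map (fun k : Nat => (k : Int))).reverse) := by
  intro m
  induction m with
  | zero => intro _; simp [bGo, aScan]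
  | succ m ih =>
    intro hle
    have hm : m < (pvSplitDot key).length := by omega
    have htake : ((pvSplitDot key).take (m+1)).reverse
        = (pvSplitDot key)[m] :: ((pvSplitDot key).take m).reverse := by
      rw [List.take_add_one, List.getElem?_eq_getElem hm]
      simp
    have hrange : ((List.range (m+1)).map (fun k : Nat => (k : Int))).reverse
        = ((m : Nat) : Int) :: ((List.range m).map (fun k : Nat => (k : Int))).reverse := by
      rw [List.range_succ]
      simp
    rw [htake, hrange]
    -- unfold one step of each scan
    have hslice : PySem.List.slice (pvSplitDot key) (some ((m : Nat) : Int)) none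
        = (pvSplitDot key).drop m := by
      rw [PySem.List.slice_from _ (by positivity : (0:Int) ≤ ((m : Nat) : Int))]
      simp
    have hcand : (match (if m + 1 = (pvSplitDot key).length then none
            else some (PySem.Str.join "." ((pvSplitDot key).drop (m+1)))) with
          | none => (pvSplitDot key)[m]
          | some c => strCat (pvSplitDot key)[m] (strCat "." c))
        = PySem.Str.join "." ((pvSplitDot key).drop m) := by
      rw [join_drop_step _ m hm]
      by_cases he : m + 1 = (pvSplitDot key).length
      · rw [if_pos he, if_pos he]
      · rw [if_neg he, if_neg he]
    have hks : PySem.Str.endswith key (PySem.Str.join "." ((pvSplitDot key).drop m)) = true := by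
      rw [PySem.Str.endswith_eq, PySem.Chars.endswith_iff]
      exact join_drop_suffix key m
    have hcond : ((bCounts special).1.getD (PySem.Str.join "." ((pvSplitDot key).drop m)) 0
          == (bCounts special).2.getD key 0)
        = aCond special key (PySem.Str.join "." ((pvSplitDot key).drop m)) := by
      rw [bCounts_fst, bCounts_snd, cond_iff special key _ hks]
    simp only [bGo, aScan, hslice, hcand, hcond]
    by_cases hc : aCond special key (PySem.Str.join "." ((pvSplitDot key).drop m))
    · rw [if_pos hc, if_pos hc]
    · rw [if_neg hc, if_neg hc]
      by_cases hz : m = (pvSplitDot key).length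
      · omega
      · rw [← ih (by omega), if_neg hz]

-- the whole inner loop of each port, as the Option it produces, agree
theorem option_eq (special : List (String × String)) (key : String) :
    bGo (bCounts special).1 ((bCounts special).2.getD key 0) none
        ((PySem.Str.split? key ".").getD []).reverse
      = aScan special key (pvSplitDot key)
          ((PySem.List.pyRange 0 ((pvSplitDot key).length : Int) 1).reverse) := by
  have h := scan_eq special key (pvSplitDot key).length (le_refl _)
  rw [if_pos rfl, List.take_length] at h
  rw [PySem.List.pyRange_zero_natCast]
  exact h

-- ===== VERDICT (by name: the statement is the Claim_ definition above) =====
theorem get_short_special_spec : Claim_equal_get_short_special := by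
  intro special _
  unfold Spec_get_short_special get_short_special get_short_special_alt
  simp only []
  -- fold A's loop against B's map-then-filterMap, pointwise via option_eq
  suffices h : ∀ (l : List (String × String)) (acc : List (String × String)),
      l.foldl (fun acc kv =>
        let key_parts := pvSplitDot kv.1
        match aScan special kv.1 key_parts
            ((PySem.List.pyRange 0 (key_parts.length : Int) 1).reverse) with
        | some s => acc ++ [(s, kv.2)]
        | none => acc) acc
      = acc ++ (l.map (fun kv =>
          (bGo (bCounts special).1 ((bCounts special).2.getD kv.1 0) none
            ((PySem.Str.split? kv.1 ".").getD []).reverse, kv.2))).filterMap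
          (fun p => p.1.map (fun s => (s, p.2))) by
    simpa using h special []
  intro l
  induction l with
  | nil => intro acc; simp
  | cons kv rest ih =>
    intro acc
    simp only [List.foldl_cons, List.map_cons, List.filterMap_cons]
    rw [ih, ← option_eq special kv.1]
    cases hb : bGo (bCounts special).1 ((bCounts special).2.getD kv.1 0) none
        ((PySem.Str.split? kv.1 ".").getD []).reverse with
    | none => simp
    | some s => simp
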